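-- pv_equiv track=rewrite | github.com/drewdotson/KnoxvilleUtilitiesBoardSpreadsheetAutomation | update_area_metrics.py | create_amount_jobs_per_time_range_dicts
-- ===== SOURCE A (Python) =====
-- def create_amount_jobs_per_time_range_dicts(start_to_complete_times_dict):
--
--     # Three empty dictionaries are created for each of the three time ranges.
--     jobs_under_10 = {}
--     jobs_10_to_16 = {}
--     jobs_above_16 = {}
--
--     # The function iterates over every work area in the dictionary.
--     for area_ID in start_to_complete_times_dict:
--
--         # The three time range dictionaries are assigned the work area ID as a key with no values in it.
--         jobs_under_10[area_ID] = None
--         jobs_10_to_16[area_ID] = None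
--         jobs_above_16[area_ID] = None
--
--         # Three variables are created that will be used to store the amount of jobs that were completed in the
--         # three time ranges for the specified work area. They are initially assigned a value of 0, but will be
--         # incremented as completed job times are assessed.
--         amount_under_10 = 0
--         amount_10_to_16 = 0
--         amount_above_16 = 0
--
--         # The list of job time values for the specified work area are assigned to a variable.
--         job_times = start_to_complete_times_dict[area_ID]
--
--         # The function iterates over every value in the list of job time values.
--         for job_time in job_times:
--
--             # If the value is less than ten, then the variable for the amount of jobs completed in under 10 days
--             # is incremented by 1.
--             if job_time < 10:
--                 amount_under_10 += 1
--
--             # If the value between 10 and 16, then the variable for the amount of jobs completed in between 10 and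
--             # 16 days is incremented by 1.
--             elif 10 <= job_time <= 16:
--                 amount_10_to_16 += 1
--
--             # If the value is greater than 16, then the variable for the amount of jobs completed in above 16 days
--             # is incremented by 1.
--             else:
--                 amount_above_16 += 1
--
--         # After the function iterates over every value in the list of job times values, then the value for the key
--         # corresponding to the work area in each of the three time range dictionaries is updated with the variable
--         # for the amount of jobs completed in the corresponding time range.
--         jobs_under_10.update({area_ID: amount_under_10})
--         jobs_10_to_16.update({area_ID: amount_10_to_16})
--         jobs_above_16.update({area_ID: amount_above_16})
--
--     # Once the function iterates over each work area, the three dictionaries containg the amount of completed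
--     # installation jobs for the three time ranges are returned.
--     return jobs_under_10, jobs_10_to_16, jobs_above_16
-- ===== SOURCE B (Python) =====
-- def create_amount_jobs_per_time_range_dicts(start_to_complete_times_dict):
--     jobs_under_10 = {area: sum(1 for t in times if t < 10)
--                      for area, times in start_to_complete_times_dict.items()}
--     jobs_10_to_16 = {area: sum(1 for t in times if 10 <= t <= 16)
--                      for area, times in start_to_complete_times_dict.items()}
--     jobs_above_16 = {area: sum(1 for t in times if t > 16)
--                      for area, times in start_to_complete_times_dict.items()}
--     return jobs_under_10, jobs_10_to_16, jobs_above_16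
-- ===== Notes on version B (the rewrite author's own statement) =====
-- stated objective: simpler
-- what changed: Replaces A's single combined pass (per-area counter triple, None placeholder assignments, if/elif/else) with three independent dict comprehensions over items(), each counting one duration bucket per area.
import Mathlib
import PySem

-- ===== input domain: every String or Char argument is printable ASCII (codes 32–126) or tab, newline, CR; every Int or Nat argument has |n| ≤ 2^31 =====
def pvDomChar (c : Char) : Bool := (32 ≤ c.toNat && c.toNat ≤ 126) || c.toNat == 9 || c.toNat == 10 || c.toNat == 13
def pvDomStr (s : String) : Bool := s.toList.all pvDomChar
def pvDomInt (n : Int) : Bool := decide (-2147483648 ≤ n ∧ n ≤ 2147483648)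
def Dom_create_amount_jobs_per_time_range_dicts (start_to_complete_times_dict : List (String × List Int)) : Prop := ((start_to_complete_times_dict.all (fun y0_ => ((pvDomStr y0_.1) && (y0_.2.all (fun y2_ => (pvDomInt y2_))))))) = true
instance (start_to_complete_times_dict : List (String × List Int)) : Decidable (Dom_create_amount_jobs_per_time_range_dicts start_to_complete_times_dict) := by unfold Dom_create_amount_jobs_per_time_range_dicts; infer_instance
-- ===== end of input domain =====

-- B replaces A's single combined pass (counter triple + None placeholders + if/elif/else)
-- with three independent per-bucket dict comprehensions; same cost, simpler decomposition.


-- ===== PORT A =====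
-- Transliteration of A: one pass over the work areas; for each area an inner pass over its
-- job times maintaining three counters with if/elif/else, then the three dicts are updated.
-- Python first assigns None to the key and immediately overwrites it; the placeholder insert
-- is ported as an insert of 0 that the following insert overwrites (value never read).
def create_amount_jobs_per_time_range_dicts (start_to_complete_times_dict : List (String × List Int)) : (List (String × Int)) × (List (String × Int)) × (List (String × Int)) :=
  let din : PySem.Dict String (List Int) := PySem.Dict.mk start_to_complete_times_dict
  let res := start_to_complete_times_dict.foldl
    (fun (acc : PySem.Dict String Int × PySem.Dict String Int × PySem.Dict String Int) p =>
      let area_ID := p.1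
      let acc1 := acc.1.insert area_ID 0       -- jobs_under_10[area_ID] = None (placeholder)
      let acc2 := acc.2.1.insert area_ID 0     -- jobs_10_to_16[area_ID] = None (placeholder)
      let acc3 := acc.2.2.insert area_ID 0     -- jobs_above_16[area_ID] = None (placeholder)
      let job_times := din.getD area_ID []     -- start_to_complete_times_dict[area_ID]
      let counts := job_times.foldl
        (fun (c : Int × Int × Int) job_time =>
          if job_time < 10 then (c.1 + 1, c.2.1, c.2.2)
          else if 10 ≤ job_time ∧ job_time ≤ 16 then (c.1, c.2.1 + 1, c.2.2)
          else (c.1, c.2.1, c.2.2 + 1))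
        (0, 0, 0)
      (acc1.insert area_ID counts.1, acc2.insert area_ID counts.2.1, acc3.insert area_ID counts.2.2))
    (PySem.Dict.empty, PySem.Dict.empty, PySem.Dict.empty)
  (res.1.items, res.2.1.items, res.2.2.items)

-- ===== PORT B =====
-- Transliteration of B: three dict comprehensions, each mapping every area to the count of
-- one bucket of its times (sum of a 0/1 comprehension = countP).
def create_amount_jobs_per_time_range_dicts_alt (start_to_complete_times_dict : List (String × List Int)) : (List (String × Int)) × (List (String × Int)) × (List (String × Int)) :=
  (start_to_complete_times_dict.map (fun p => (p.1, ((p.2.countP (fun t => decide (t < 10)) : Nat) : Int))),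
   start_to_complete_times_dict.map (fun p => (p.1, ((p.2.countP (fun t => decide (10 ≤ t ∧ t ≤ 16)) : Nat) : Int))),
   start_to_complete_times_dict.map (fun p => (p.1, ((p.2.countP (fun t => decide (16 < t)) : Nat) : Int))))

-- ===== PRECONDITION & SPEC =====
-- The argument models a Python dict, which cannot hold duplicate keys; Pre_ restricts the
-- association list to pairwise-distinct keys (no narrowing of A's actual domain).
def Pre_create_amount_jobs_per_time_range_dicts (start_to_complete_times_dict : List (String × List Int)) : Prop :=
  (start_to_complete_times_dict.map Prod.fst).Nodup
instance (start_to_complete_times_dict : List (String × List Int)) : Decidable (Pre_create_amount_jobs_per_time_range_dicts start_to_complete_times_dict) := by unfold Pre_create_amount_jobs_per_time_range_dicts; infer_instance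

def pvWitness_create_amount_jobs_per_time_range_dicts : (List (String × List Int)) :=
  [("A1", [3, 10, 17]), ("B2", [])]

def Spec_create_amount_jobs_per_time_range_dicts (start_to_complete_times_dict : List (String × List Int)) (out : (List (String × Int)) × (List (String × Int)) × (List (String × Int))) : Prop := out = create_amount_jobs_per_time_range_dicts_alt start_to_complete_times_dict
instance (start_to_complete_times_dict : List (String × List Int)) (out : (List (String × Int)) × (List (String × Int)) × (List (String × Int))) : Decidable (Spec_create_amount_jobs_per_time_range_dicts start_to_complete_times_dict out) := by unfold Spec_create_amount_jobs_per_time_range_dicts; infer_instance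

-- ===== CLAIM (what is proved, stated in full; the proofs are below) =====
def Claim_equal_create_amount_jobs_per_time_range_dicts : Prop := ∀ (start_to_complete_times_dict : List (String × List Int)), Dom_create_amount_jobs_per_time_range_dicts start_to_complete_times_dict → Pre_create_amount_jobs_per_time_range_dicts start_to_complete_times_dict → Spec_create_amount_jobs_per_time_range_dicts start_to_complete_times_dict (create_amount_jobs_per_time_range_dicts start_to_complete_times_dict)

-- ===== LEMMAS AND PROOFS =====

-- A's inner counting loop computes the three bucket counts of B.
lemma pvCounts_eq (ts : List Int) (a b c : Int) :
    ts.foldl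
      (fun (c : Int × Int × Int) job_time =>
        if job_time < 10 then (c.1 + 1, c.2.1, c.2.2)
        else if 10 ≤ job_time ∧ job_time ≤ 16 then (c.1, c.2.1 + 1, c.2.2)
        else (c.1, c.2.1, c.2.2 + 1))
      (a, b, c)
    = (a + (ts.countP (fun t => decide (t < 10)) : Int),
       b + (ts.countP (fun t => decide (10 ≤ t ∧ t ≤ 16)) : Int),
       c + (ts.countP (fun t => decide (16 < t)) : Int)) := by
  induction ts generalizing a b c with
  | nil => simp
  | cons t ts ih =>
    simp only [List.foldl_cons]
    by_cases h1 : t < 10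
    · have h2 : ¬(10 ≤ t ∧ t ≤ 16) := by omega
      have h3 : ¬(16 < t) := by omega
      rw [if_pos h1, ih]
      simp only [List.countP_cons, Prod.ext_iff, h1, h2, h3, decide_true,
        decide_false, if_true]
      push_cast
      omega
    · by_cases h2 : 10 ≤ t ∧ t ≤ 16
      · have h3 : ¬(16 < t) := by omega
        rw [if_neg h1, if_pos h2, ih]
        simp only [List.countP_cons, Prod.ext_iff, h1, h2, h3, and_self, decide_true,
          decide_false, if_true]
        push_cast
        omega
      · have h3 : 16 < t := by omega
        rw [if_neg h1, if_neg h2, ih]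
        simp only [List.countP_cons, Prod.ext_iff, h1, h2, h3, decide_true,
          decide_false, if_true]
        push_cast
        omega

theorem create_amount_jobs_per_time_range_dicts_spec : Claim_equal_create_amount_jobs_per_time_range_dicts := by
  intro d _ hpre
  unfold Spec_create_amount_jobs_per_time_range_dicts
  unfold create_amount_jobs_per_time_range_dicts create_amount_jobs_per_time_range_dicts_alt
  simp only [PySem.Dict.insert_insert_self, pvCounts_eq, zero_add]
  have hkeys : (PySem.Dict.mk d).keys.Nodup := by
    simpa [PySem.Dict.keys, PySem.Dict.items] using hpre
  rw [PySem.List.foldl_congr_mem d _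
    (fun (acc : PySem.Dict String Int × PySem.Dict String Int × PySem.Dict String Int)
         (p : String × List Int) =>
      (acc.1.insert p.1 ((p.2.countP (fun t => decide (t < 10)) : Nat) : Int),
       acc.2.1.insert p.1 ((p.2.countP (fun t => decide (10 ≤ t ∧ t ≤ 16)) : Nat) : Int),
       acc.2.2.insert p.1 ((p.2.countP (fun t => decide (16 < t)) : Nat) : Int)))
    _ ?hc]
  case hc =>
    intro acc p hp
    rw [PySem.Dict.getD_of_mem_items (PySem.Dict.mk d) hp hkeys []]
  rw [PySem.List.foldl_prod_mk
    (f := fun (s : PySem.Dict String Int) (p : String × List Int) =>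
      s.insert p.1 ((p.2.countP (fun t => decide (t < 10)) : Nat) : Int))
    (g := fun (s : PySem.Dict String Int × PySem.Dict String Int) (p : String × List Int) =>
      (s.1.insert p.1 ((p.2.countP (fun t => decide (10 ≤ t ∧ t ≤ 16)) : Nat) : Int),
       s.2.insert p.1 ((p.2.countP (fun t => decide (16 < t)) : Nat) : Int)))]
  rw [PySem.List.foldl_prod_mk
    (f := fun (s : PySem.Dict String Int) (p : String × List Int) =>
      s.insert p.1 ((p.2.countP (fun t => decide (10 ≤ t ∧ t ≤ 16)) : Nat) : Int))
    (g := fun (s : PySem.Dict String Int) (p : String × List Int) =>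
      s.insert p.1 ((p.2.countP (fun t => decide (16 < t)) : Nat) : Int))]
  refine Prod.ext ?_ (Prod.ext ?_ ?_)
  all_goals dsimp only
  all_goals rw [PySem.Dict.items_foldl_insert_fresh d Prod.fst _ PySem.Dict.empty
      (fun a _ => PySem.Dict.contains_empty _) hpre]
  all_goals simp [PySem.Dict.empty]
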